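-- pv_equiv track=rewrite | github.com/bhuvanesh00103/ADF-intern | main.py | capitalize_3rd_letter_of_a_word
-- ===== SOURCE A (Python) =====
-- def capitalize_3rd_letter_of_a_word(content):
--     from functools import reduce
--     space = 1
--     count = 0
--     list_of_letters = []
--     for i in content:
--         count += 1
--         if count / 3 == 1 and space == 1:
--             space = 0
--             list_of_letters.append(i.upper())
--         else:
--             list_of_letters.append(i)
--         if i == ' ' or i == '\n':
--             space = 1
--             count = 0
--     return reduce(lambda x, y: x + y, list_of_letters)
-- ===== SOURCE B (Python) =====
-- def capitalize_3rd_letter_of_a_word(content):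
--     # Word-chunking: jump from separator to separator and fix up the 3rd
--     # character of each chunk (the separator itself counts as part of the
--     # word it terminates, matching the counter semantics).
--     n = len(content)
--     pieces = []
--     i = 0
--     while i < n:
--         j = i
--         while j < n and content[j] != ' ' and content[j] != '\n':
--             j += 1
--         end = j + 1 if j < n else n   # include the separator in the chunk
--         if end - i >= 3:
--             pieces.append(content[i:i + 2] + content[i + 2].upper() + content[i + 3:end])
--         else:
--             pieces.append(content[i:end])
--         i = end
--     return ''.join(pieces)
-- ===== Notes on version B (the rewrite author's own statement) =====
-- stated objective: faster
-- what changed: Replaces the per-character state-machine (space/count flags, a list of 1-char strings concatenated by reduce, which is quadratic) with an index-jumping word-chunker that slices each word out of the string, fixes its 3rd character, and joins the pieces once.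
-- outside the precondition, e.g. on capitalize_3rd_letter_of_a_word(''): A raises TypeError, B returns ''
import Mathlib
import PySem

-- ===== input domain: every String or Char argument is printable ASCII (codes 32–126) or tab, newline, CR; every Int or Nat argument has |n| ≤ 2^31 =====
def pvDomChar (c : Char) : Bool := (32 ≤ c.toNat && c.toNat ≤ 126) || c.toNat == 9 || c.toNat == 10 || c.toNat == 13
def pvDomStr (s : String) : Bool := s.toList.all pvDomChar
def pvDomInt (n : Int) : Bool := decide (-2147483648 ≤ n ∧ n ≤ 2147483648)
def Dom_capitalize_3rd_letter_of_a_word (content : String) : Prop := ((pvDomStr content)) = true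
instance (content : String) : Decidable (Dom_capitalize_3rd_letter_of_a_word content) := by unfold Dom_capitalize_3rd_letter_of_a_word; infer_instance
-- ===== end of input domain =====

-- B replaces A's per-character counter state machine + quadratic reduce-concatenation by an
-- O(n) word-chunking pass (jump to each separator, fix the chunk's 3rd character, join once).

-- ===== PORT A =====
-- Python's for-loop over the string, state (space, count, accumulated list of 1-char strings).
def pvLoopA : List Char → Int → Int → List String
  | [], _, _ => []
  | c :: rest, space, count =>
    let count1 := count + 1
    -- `count / 3 == 1` is Python true division; for an int count it holds exactly when count == 3
    let p := if count1 = 3 ∧ space = 1 then ((0 : Int), PySem.Chars.upperChar c) else (space, c)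
    let q := if c = ' ' ∨ c = '\n' then ((1 : Int), (0 : Int)) else (p.1, count1)
    String.ofList [p.2] :: pvLoopA rest q.1 q.2

-- reduce(lambda x, y: x + y, l); on the empty list Python raises TypeError (excluded by Pre_)
def pvReduceConcat : List String → String
  | [] => ""
  | h :: t => t.foldl (· ++ ·) h

def capitalize_3rd_letter_of_a_word (content : String) : String :=
  pvReduceConcat (pvLoopA content.toList 1 0)

-- ===== PORT B =====
-- inner while loop: scan to the first separator; chunk includes the separator
def pvTakeWord : List Char → List Char × List Char
  | [] => ([], [])
  | c :: rest =>
    if c = ' ' ∨ c = '\n' then ([c], rest)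
    else
      let p := pvTakeWord rest
      (c :: p.1, p.2)

theorem pvTakeWord_snd_le : ∀ l : List Char, (pvTakeWord l).2.length ≤ l.length := by
  intro l; induction l with
  | nil => simp [pvTakeWord]
  | cons c rest ih =>
    simp only [pvTakeWord]
    split
    · simp
    · simpa using Nat.le_succ_of_le ih

-- content[i:i+2] + content[i+2].upper() + content[i+3:end] when the chunk has ≥ 3 chars
def pvCapChunk (w : List Char) : List Char :=
  match w with
  | a :: b :: c :: t => a :: b :: PySem.Chars.upperChar c :: t
  | w => w

-- outer while loop over the chunks
def pvLoopB : List Char → List (List Char)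
  | [] => []
  | c :: rest =>
    let p := pvTakeWord (c :: rest)
    pvCapChunk p.1 :: pvLoopB p.2
termination_by l => l.length
decreasing_by
  simp only [pvTakeWord]
  split
  · simp
  · exact Nat.lt_succ_of_le (pvTakeWord_snd_le rest)

-- ''.join(pieces) = concatenation of the chunks
def capitalize_3rd_letter_of_a_word_alt (content : String) : String :=
  String.ofList (pvLoopB content.toList).flatten

-- ===== PRECONDITION & SPEC =====
-- Pre_ excludes only the empty string, on which A's reduce raises TypeError
-- (empty sequence with no initial value); B returns "" there.
def Pre_capitalize_3rd_letter_of_a_word (content : String) : Prop := content ≠ ""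
instance (content : String) : Decidable (Pre_capitalize_3rd_letter_of_a_word content) := by
  unfold Pre_capitalize_3rd_letter_of_a_word; infer_instance

def pvWitness_capitalize_3rd_letter_of_a_word : String := "abc de"

def Spec_capitalize_3rd_letter_of_a_word (content : String) (out : String) : Prop :=
  out = capitalize_3rd_letter_of_a_word_alt content
instance (content : String) (out : String) : Decidable (Spec_capitalize_3rd_letter_of_a_word content out) := by
  unfold Spec_capitalize_3rd_letter_of_a_word; infer_instance

-- ===== CLAIM (what is proved, stated in full; the proofs are below) =====
def Claim_equal_capitalize_3rd_letter_of_a_word : Prop :=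
  ∀ (content : String), Dom_capitalize_3rd_letter_of_a_word content →
    Pre_capitalize_3rd_letter_of_a_word content →
    Spec_capitalize_3rd_letter_of_a_word content (capitalize_3rd_letter_of_a_word content)

-- ===== LEMMAS AND PROOFS =====

-- character-level view of A's loop (same states, chars instead of 1-char strings)
def pvChA : List Char → Int → Int → List Char
  | [], _, _ => []
  | c :: rest, space, count =>
    let count1 := count + 1
    let p := if count1 = 3 ∧ space = 1 then ((0 : Int), PySem.Chars.upperChar c) else (space, c)
    let q := if c = ' ' ∨ c = '\n' then ((1 : Int), (0 : Int)) else (p.1, count1)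
    p.2 :: pvChA rest q.1 q.2

theorem pvLoopA_eq_map : ∀ (cs : List Char) (sp ct : Int),
    pvLoopA cs sp ct = (pvChA cs sp ct).map (fun c => String.ofList [c]) := by
  intro cs; induction cs with
  | nil => intro sp ct; rfl
  | cons c rest ih => intro sp ct; simp only [pvLoopA, pvChA, List.map, ih]

theorem pvReduce_map_singleton : ∀ (l : List Char) (h : String),
    (l.map (fun c => String.ofList [c])).foldl (· ++ ·) h = h ++ String.ofList l := by
  intro l; induction l with
  | nil =>
    intro h; apply String.ext; simp
  | cons c t ih =>
    intro h
    simp only [List.map, List.foldl, ih]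
    apply String.ext; simp

theorem pvReduceConcat_singletons (l : List Char) (hl : l ≠ []) :
    pvReduceConcat (l.map (fun c => String.ofList [c])) = String.ofList l := by
  match l, hl with
  | c :: t, _ =>
    simp only [List.map, pvReduceConcat, pvReduce_map_singleton]
    apply String.ext; simp

def pvNonSep (c : Char) : Prop := ¬ (c = ' ' ∨ c = '\n')

-- after the capital has been placed (space = 0) the loop copies non-separator chars verbatim
theorem pvChA_nosep_run : ∀ (t r : List Char) (k : Int), (∀ c ∈ t, pvNonSep c) →
    pvChA (t ++ r) 0 k = t ++ pvChA r 0 (k + t.length) := by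
  intro t; induction t with
  | nil => intro r k _; simp
  | cons c t ih =>
    intro r k h
    have hc : ¬ (c = ' ' ∨ c = '\n') := h c (by simp)
    have ht : ∀ x ∈ t, pvNonSep x := fun x hx => h x (by simp [hx])
    simp only [List.cons_append, pvChA, if_neg hc]
    norm_num
    rw [ih _ _ ht]
    congr 2
    ring

theorem pvUpperSep {s : Char} (hs : s = ' ' ∨ s = '\n') : PySem.Chars.upperChar s = s := by
  rcases hs with h | h <;> subst h <;> decide

theorem pvCapChunk_append_sep (ys : List Char) {s : Char} (hs : s = ' ' ∨ s = '\n') :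
    pvCapChunk (ys ++ [s]) = pvCapChunk ys ++ [s] := by
  match ys with
  | [] => simp [pvCapChunk]
  | [a] => simp [pvCapChunk]
  | [a, b] => simp [pvCapChunk, pvUpperSep hs]
  | a :: b :: c :: t => simp [pvCapChunk]

-- A's loop over one whole word (all non-separators), started fresh
theorem pvChA_word : ∀ (ys r : List Char), (∀ c ∈ ys, pvNonSep c) →
    pvChA (ys ++ r) 1 0 =
      pvCapChunk ys ++ pvChA r (if 3 ≤ ys.length then 0 else 1) (ys.length : Int) := by
  intro ys r h
  match ys with
  | [] => simp [pvCapChunk]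
  | [a] =>
    have ha : ¬ (a = ' ' ∨ a = '\n') := h a (by simp)
    simp [pvChA, pvCapChunk, ha]
  | [a, b] =>
    have ha : ¬ (a = ' ' ∨ a = '\n') := h a (by simp)
    have hb : ¬ (b = ' ' ∨ b = '\n') := h b (by simp)
    simp [pvChA, pvCapChunk, ha, hb]
  | a :: b :: c :: t =>
    have ha : ¬ (a = ' ' ∨ a = '\n') := h a (by simp)
    have hb : ¬ (b = ' ' ∨ b = '\n') := h b (by simp)
    have hc : ¬ (c = ' ' ∨ c = '\n') := h c (by simp)
    have ht : ∀ x ∈ t, pvNonSep x := fun x hx => h x (by simp [hx])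
    simp only [List.cons_append, pvChA, if_neg ha, if_neg hb, if_neg hc]
    norm_num
    rw [pvChA_nosep_run t r 3 ht]
    simp [pvCapChunk]
    congr 1
    omega

theorem pvChA_sep_step (s : Char) (r2 : List Char) (n : Nat) (hs : s = ' ' ∨ s = '\n') :
    pvChA (s :: r2) (if 3 ≤ n then 0 else 1) (n : Int) = s :: pvChA r2 1 0 := by
  simp only [pvChA, if_pos hs]
  congr 1
  by_cases h3 : 3 ≤ n
  · rw [if_pos h3, if_neg (by norm_num)]
  · rw [if_neg h3]
    by_cases h2 : (n : Int) + 1 = 3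
    · rw [if_pos ⟨h2, rfl⟩]
      exact pvUpperSep hs
    · rw [if_neg (by tauto)]

theorem pvTakeWord_cases : ∀ l : List Char,
    ((∀ c ∈ (pvTakeWord l).1, pvNonSep c) ∧ (pvTakeWord l).2 = [] ∧ (pvTakeWord l).1 = l) ∨
    (∃ ys s, (∀ c ∈ ys, pvNonSep c) ∧ (s = ' ' ∨ s = '\n') ∧
       (pvTakeWord l).1 = ys ++ [s] ∧ l = ys ++ s :: (pvTakeWord l).2) := by
  intro l; induction l with
  | nil => left; simp [pvTakeWord]
  | cons c rest ih =>
    by_cases hc : c = ' ' ∨ c = '\n'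
    · right
      exact ⟨[], c, by simp, hc, by simp [pvTakeWord, hc], by simp [pvTakeWord, hc]⟩
    · rcases ih with ⟨h1, h2, h3⟩ | ⟨ys, s, h1, h2, h3, h4⟩
      · left
        refine ⟨?_, by simp [pvTakeWord, hc, h2], by simp [pvTakeWord, hc, h3]⟩
        intro x hx
        simp only [pvTakeWord, if_neg hc] at hx
        rcases List.mem_cons.mp hx with rfl | hx
        · exact hc
        · exact h1 x hx
      · right
        refine ⟨c :: ys, s, ?_, h2, by simp [pvTakeWord, hc, h3], ?_⟩
        · intro x hx
          rcases List.mem_cons.mp hx with rfl | hx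
          · exact hc
          · exact h1 x hx
        · simp only [pvTakeWord, if_neg hc]
          simpa using h4

theorem pvMain : ∀ (cs : List Char), pvChA cs 1 0 = (pvLoopB cs).flatten := by
  intro cs
  induction cs using pvLoopB.induct with
  | case1 => simp [pvLoopB, pvChA]
  | case2 c rest p ih =>
    rw [pvLoopB]
    rcases pvTakeWord_cases (c :: rest) with ⟨h1, h2, h3⟩ | ⟨ys, s, h1, h2, h3, h4⟩
    · conv_lhs => rw [← h3, ← List.append_nil (pvTakeWord (c :: rest)).1]
      rw [pvChA_word _ _ h1]
      simp [h2, pvLoopB, pvChA]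
    · conv_lhs => rw [h4]
      rw [pvChA_word _ _ h1, pvChA_sep_step _ _ _ h2]
      rw [show (pvTakeWord (c :: rest)).2 = p.2 from rfl] at h4 ⊢
      rw [ih]
      rw [show (pvTakeWord (c :: rest)).1 = ys ++ [s] from h3, pvCapChunk_append_sep _ h2]
      simp

theorem pvChA_ne_nil (c : Char) (rest : List Char) (sp ct : Int) :
    pvChA (c :: rest) sp ct ≠ [] := by
  simp [pvChA]

-- ===== VERDICT (by name: the statement is the Claim_ definition above) =====
theorem capitalize_3rd_letter_of_a_word_spec : Claim_equal_capitalize_3rd_letter_of_a_word := by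
  intro content _ hpre
  unfold Spec_capitalize_3rd_letter_of_a_word
  unfold capitalize_3rd_letter_of_a_word capitalize_3rd_letter_of_a_word_alt
  have hne : content.toList ≠ [] := by
    intro h; exact hpre (by apply String.ext; simpa using h)
  obtain ⟨c, rest, h⟩ := List.exists_cons_of_ne_nil hne
  rw [pvLoopA_eq_map, pvReduceConcat_singletons _ (by rw [h]; exact pvChA_ne_nil c rest 1 0), pvMain]
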